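-- pv_equiv track=rewrite | github.com/VetalMart/scanDocTools | salt.py | whitespace_remover
-- ===== SOURCE A (Python) =====
-- def whitespace_remover(s):
--     """Delete whitespace if it repeate > 2 times, or after \n"""
--     tmp_s = ''
--     c = 0
--     for i in s:
--         if not i.isspace():
--             tmp_s += i
--             c = 0
--         elif i.isspace():
--             if c == 0:
--                 tmp_s += i
--                 c = 1
--             else:
--                 pass
--
--     return tmp_s.lower()
-- ===== SOURCE B (Python) =====
-- def whitespace_remover(s):
--     """Delete whitespace if it repeate > 2 times, or after \n"""
--     out = []
--     i = 0
--     n = len(s)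
--     while i < n:
--         j = i + 1
--         if s[i].isspace():
--             while j < n and s[j].isspace():
--                 j += 1
--             out.append(s[i])
--         else:
--             while j < n and not s[j].isspace():
--                 j += 1
--             out.append(s[i:j])
--         i = j
--     return ''.join(out).lower()
-- ===== Notes on version B (the rewrite author's own statement) =====
-- stated objective: alternative
-- what changed: B scans the string as maximal whitespace/non-whitespace runs with a two-pointer loop, appending each non-space run as one slice and only the first char of each space run, instead of A's per-character loop with a counter flag and repeated string concatenation.
import Mathlib
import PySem

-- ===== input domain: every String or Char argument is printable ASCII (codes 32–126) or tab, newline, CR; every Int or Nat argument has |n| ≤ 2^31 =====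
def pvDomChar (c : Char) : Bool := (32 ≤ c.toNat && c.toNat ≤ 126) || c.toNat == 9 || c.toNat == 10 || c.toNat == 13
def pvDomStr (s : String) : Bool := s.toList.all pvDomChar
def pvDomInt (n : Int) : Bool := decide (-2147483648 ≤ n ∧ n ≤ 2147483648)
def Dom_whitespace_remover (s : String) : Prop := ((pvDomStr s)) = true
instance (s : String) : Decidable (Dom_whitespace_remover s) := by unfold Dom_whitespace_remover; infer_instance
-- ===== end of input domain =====

-- B re-implements A as a scan over maximal whitespace/non-whitespace runs (alternative decomposition, no per-char counter).

-- ===== PORT A =====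
-- per-character fold carrying (accumulated chars, counter c), exactly A's loop body
def pvStepA (st : List Char × Int) (i : Char) : List Char × Int :=
  if ¬ (PySem.Chars.isspace i = true) then (st.1 ++ [i], 0)
  else if PySem.Chars.isspace i = true then
    if st.2 = 0 then (st.1 ++ [i], 1) else st
  else st

def whitespace_remover (s : String) : String :=
  PySem.Str.lower (String.mk (s.toList.foldl pvStepA (([] : List Char), (0 : Int))).1)

-- ===== PORT B =====
-- B's while loop: at each run start, advance j over the run (takeWhile/dropWhile),
-- emit the first char of a whitespace run or the whole non-whitespace run.
def pvRunsB (l : List Char) : List Char :=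
  match l with
  | [] => []
  | x :: xs =>
    if PySem.Chars.isspace x then
      x :: pvRunsB (xs.dropWhile (fun y => PySem.Chars.isspace y))
    else
      (x :: xs.takeWhile (fun y => !PySem.Chars.isspace y))
        ++ pvRunsB (xs.dropWhile (fun y => !PySem.Chars.isspace y))
  termination_by l.length
  decreasing_by
    · exact Nat.lt_succ_of_le (List.length_dropWhile_le _ _)
    · exact Nat.lt_succ_of_le (List.length_dropWhile_le _ _)

def whitespace_remover_alt (s : String) : String :=
  PySem.Str.lower (String.mk (pvRunsB s.toList))

-- ===== PRECONDITION & SPEC =====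
def Spec_whitespace_remover (s : String) (out : String) : Prop := out = whitespace_remover_alt s
instance (s : String) (out : String) : Decidable (Spec_whitespace_remover s out) := by unfold Spec_whitespace_remover; infer_instance

-- ===== CLAIM (what is proved, stated in full; the proofs are below) =====
def Claim_equal_whitespace_remover : Prop := ∀ (s : String), Dom_whitespace_remover s → Spec_whitespace_remover s (whitespace_remover s)

-- ===== LEMMAS AND PROOFS =====

-- recursive characterisation of A's fold
def pvFA (c : Int) : List Char → List Char
  | [] => []
  | x :: xs =>
    if PySem.Chars.isspace x = false then x :: pvFA 0 xs
    else if c = 0 then x :: pvFA 1 xs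
    else pvFA c xs

theorem pvFoldA_eq (l : List Char) : ∀ (acc : List Char) (c : Int),
    (l.foldl pvStepA (acc, c)).1 = acc ++ pvFA c l := by
  induction l with
  | nil => intro acc c; simp [pvFA]
  | cons x xs ih =>
    intro acc c
    rw [List.foldl_cons]
    by_cases hx : PySem.Chars.isspace x = true
    · by_cases hc : c = 0
      · rw [show pvStepA (acc, c) x = (acc ++ [x], 1) by simp [pvStepA, hx, hc]]
        rw [ih]
        simp [pvFA, hx, hc]
      · rw [show pvStepA (acc, c) x = (acc, c) by simp [pvStepA, hx, hc]]
        rw [ih]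
        simp [pvFA, hx, hc]
    · rw [show pvStepA (acc, c) x = (acc ++ [x], 0) by simp [pvStepA, hx]]
      rw [ih]
      simp [pvFA, Bool.eq_false_iff.mpr hx]

-- after a whitespace run (c = 1) further whitespace is dropped
theorem pvFA_one_dropWhile (xs : List Char) :
    pvFA 1 xs = pvFA 0 (xs.dropWhile (fun y => PySem.Chars.isspace y)) := by
  induction xs with
  | nil => simp [pvFA]
  | cons y ys ih =>
    by_cases hy : PySem.Chars.isspace y = true
    · simp [pvFA, hy, List.dropWhile_cons, ih]
    · simp [pvFA, hy, List.dropWhile_cons, Bool.eq_false_iff.mpr hy]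

-- a non-whitespace prefix is copied verbatim
theorem pvFA_zero_split (xs : List Char) :
    pvFA 0 xs = xs.takeWhile (fun y => !PySem.Chars.isspace y)
      ++ pvFA 0 (xs.dropWhile (fun y => !PySem.Chars.isspace y)) := by
  induction xs with
  | nil => simp [pvFA]
  | cons y ys ih =>
    by_cases hy : PySem.Chars.isspace y = true
    · simp [pvFA, hy, List.takeWhile_cons, List.dropWhile_cons]
    · simp [pvFA, hy, List.takeWhile_cons, ih]

theorem pvRunsB_eq_pvFA (l : List Char) : pvRunsB l = pvFA 0 l := by
  induction l using pvRunsB.induct with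
  | case1 => simp [pvRunsB, pvFA]
  | case2 x xs hx ih =>
    rw [pvRunsB, if_pos hx, ih, ← pvFA_one_dropWhile]
    simp [pvFA, hx]
  | case3 x xs hx ih =>
    have hx' : PySem.Chars.isspace x = false := by
      revert hx; cases PySem.Chars.isspace x <;> simp
    rw [pvRunsB, if_neg hx, ih, pvFA_zero_split (x :: xs)]
    simp [List.takeWhile_cons, hx']

-- ===== VERDICT (by name: the statement is the Claim_ definition above) =====
theorem whitespace_remover_spec : Claim_equal_whitespace_remover := by
  intro s _
  unfold Spec_whitespace_remover whitespace_remover whitespace_remover_alt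
  rw [pvFoldA_eq, pvRunsB_eq_pvFA]
  simp
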